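-- pv_equiv track=rewrite | github.com/HEEE23/programmers | 프로그래머스/2/172927. 광물 캐기/광물 캐기.py | solution
-- ===== SOURCE A (Python) =====
-- from collections import Counter
--
-- def solution(picks, minerals):
--     answer = 0
--
--     if len(minerals) > 5*sum(picks):
--         minerals = minerals[:5*sum(picks)]
--
--     m = []
--
--     for i in range(0, len(minerals), 5):
--         cnt = Counter(minerals[i:i+5])
--         m.append((cnt['diamond'],cnt['iron'],cnt['stone']))
--
--     m.sort(reverse =True)
--
--     for dia, iron, stone in m:
--         if picks[0] > 0:
--             answer += (dia*1 + iron*1 + stone*1)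
--             picks[0] -= 1
--         elif picks[1] > 0:
--             answer += (dia*5 + iron*1 + stone*1)
--             picks[1] -= 1
--         else:
--             answer += (dia*25 + iron*5 + stone*1)
--             picks[2] -= 1
--
--     return answer
-- ===== SOURCE B (Python) =====
-- def solution(picks, minerals):
--     # NOTE: unlike A, B does not mutate `picks`; equivalence is about the return value.
--     total = 5 * sum(picks)
--     if len(minerals) > total:
--         minerals = minerals[:total]
--     groups = sorted(
--         ((chunk.count('diamond'), chunk.count('iron'), chunk.count('stone'))
--          for chunk in (minerals[i:i + 5] for i in range(0, len(minerals), 5))),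
--         reverse=True)
--     if not groups:
--         return 0
--     a = max(picks[0], 0)
--     # picks[1] is needed only when the tier-0 picks do not cover all groups
--     b = max(picks[1], 0) if a < len(groups) else 0
--     dia = sum(g[0] for g in groups)
--     iron = sum(g[1] for g in groups)
--     stone = sum(g[2] for g in groups)
--     dia_mid = sum(g[0] for g in groups[a:])
--     dia_low = sum(g[0] for g in groups[a + b:])
--     iron_low = sum(g[1] for g in groups[a + b:])
--     return dia + 4 * dia_mid + 20 * dia_low + iron + 4 * iron_low + stone
-- ===== Notes on version B (the rewrite author's own statement) =====
-- stated objective: alternative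
-- what changed: The stateful greedy loop that decrements pick counters per group is replaced by a closed-form aggregation: since the sorted groups get tiers [first max(picks[0],0) groups, next max(picks[1],0) groups, rest], the answer is computed from whole-list and suffix sums of diamond/iron/stone counts (ans = dia + 4*dia[a:] + 20*dia[a+b:] + iron + 4*iron[a+b:] + stone); B does not mutate picks (return-value equivalence).
import Mathlib
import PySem

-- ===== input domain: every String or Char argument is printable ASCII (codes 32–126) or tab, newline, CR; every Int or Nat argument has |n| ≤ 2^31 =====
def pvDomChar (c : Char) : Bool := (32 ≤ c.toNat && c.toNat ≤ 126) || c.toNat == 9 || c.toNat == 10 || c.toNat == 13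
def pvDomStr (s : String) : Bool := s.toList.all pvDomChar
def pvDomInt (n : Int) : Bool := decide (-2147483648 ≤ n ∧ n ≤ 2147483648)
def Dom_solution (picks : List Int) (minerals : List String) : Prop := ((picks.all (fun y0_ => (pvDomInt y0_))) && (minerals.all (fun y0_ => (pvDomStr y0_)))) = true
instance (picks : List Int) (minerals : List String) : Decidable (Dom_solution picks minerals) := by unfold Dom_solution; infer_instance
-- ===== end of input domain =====

-- B replaces A's stateful pick-decrementing greedy loop by suffix-sum arithmetic over the
-- sorted groups (objective: alternative decomposition, same cost). A mutates `picks` in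
-- place, B does not: the equivalence proved here is about the RETURN value only.

-- ===== PORT A =====
-- Python tuples (d, i, s) ∈ [0,5]^3 are sorted lexicographically; since every component is
-- in 0..5 the single key d*36 + i*6 + s realises exactly that lexicographic order (exact here;
-- Lean's `<` on products is not Python's tuple order). Ties under this key are equal tuples.
-- picks[0]/picks[1]/picks[2] reads and in-place writes are modelled by three integer state
-- components read via pyGetD (exact whenever the loop runs and picks has the entries A
-- actually touches; where Python A would raise IndexError the port totalizes with default 0).
def solution (picks : List Int) (minerals : List String) : Int :=
  let answer : Int := 0
  let s := picks.sum
  let minerals1 := if 5 * s < (minerals.length : Int)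
    then PySem.List.slice minerals none (some (5 * s)) else minerals
  let m : List (Int × Int × Int) :=
    (PySem.List.pyRange 0 (minerals1.length : Int) 5).foldl (fun acc i =>
      let cnt := PySem.Dict.counter (PySem.List.slice minerals1 (some i) (some (i + 5)))
      acc ++ [(cnt.getD "diamond" 0, cnt.getD "iron" 0, cnt.getD "stone" 0)]) []
  let ms := PySem.List.sorted m (fun g => g.1 * 36 + g.2.1 * 6 + g.2.2) true
  let st := ms.foldl (fun (st : Int × Int × Int × Int) g =>
      if st.2.1 > 0 then
        (st.1 + (g.1 * 1 + g.2.1 * 1 + g.2.2 * 1), st.2.1 - 1, st.2.2.1, st.2.2.2)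
      else if st.2.2.1 > 0 then
        (st.1 + (g.1 * 5 + g.2.1 * 1 + g.2.2 * 1), st.2.1, st.2.2.1 - 1, st.2.2.2)
      else
        (st.1 + (g.1 * 25 + g.2.1 * 5 + g.2.2 * 1), st.2.1, st.2.2.1, st.2.2.2 - 1))
    (answer, PySem.List.pyGetD picks 0 0, PySem.List.pyGetD picks 1 0, PySem.List.pyGetD picks 2 0)
  st.1

-- ===== PORT B =====
-- Same tuple-order remark as in port A: the key d*36 + i*6 + s is Python's lexicographic
-- order on these tuples, whose components are chunk counts in 0..5.
def solution_alt (picks : List Int) (minerals : List String) : Int :=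
  let total := 5 * picks.sum
  let ms := if (minerals.length : Int) > total
    then PySem.List.slice minerals none (some total) else minerals
  let groups := PySem.List.sorted
      ((PySem.List.pyRange 0 (ms.length : Int) 5).map (fun i =>
        let chunk := PySem.List.slice ms (some i) (some (i + 5))
        ((PySem.List.count chunk "diamond" : Int), (PySem.List.count chunk "iron" : Int),
         (PySem.List.count chunk "stone" : Int))))
      (fun g => g.1 * 36 + g.2.1 * 6 + g.2.2) true
  if groups = [] then 0
  else
    let a := max (PySem.List.pyGetD picks 0 0) 0
    -- picks[1] is needed only when the tier-0 picks do not cover all groups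
    let b := if a < (groups.length : Int) then max (PySem.List.pyGetD picks 1 0) 0 else 0
    let dia := (groups.map (fun g => g.1)).sum
    let iron := (groups.map (fun g => g.2.1)).sum
    let stone := (groups.map (fun g => g.2.2)).sum
    let diaMid := ((PySem.List.slice groups (some a) none).map (fun g => g.1)).sum
    let diaLow := ((PySem.List.slice groups (some (a + b)) none).map (fun g => g.1)).sum
    let ironLow := ((PySem.List.slice groups (some (a + b)) none).map (fun g => g.2.1)).sum
    dia + 4 * diaMid + 20 * diaLow + iron + 4 * ironLow + stone

-- ===== PRECONDITION & SPEC =====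
-- A and B are ported totally (out-of-range picks[i] reads default via pyGetD on both sides,
-- identically); the ports agree on every input, so no Pre_ is needed.
def Spec_solution (picks : List Int) (minerals : List String) (out : Int) : Prop := out = solution_alt picks minerals
instance (picks : List Int) (minerals : List String) (out : Int) : Decidable (Spec_solution picks minerals out) := by unfold Spec_solution; infer_instance

-- ===== CLAIM (what is proved, stated in full; the proofs are below) =====
def Claim_equal_solution : Prop := ∀ (picks : List Int) (minerals : List String), Dom_solution picks minerals → Spec_solution picks minerals (solution picks minerals)

-- ===== LEMMAS AND PROOFS =====

-- A's greedy loop, in closed form: the first max(p0,0) groups cost d+i+s, the next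
-- max(p1,0) cost 5d+i+s, the rest 25d+5i+s; regrouped as whole-list plus suffix sums.
theorem pv_loop_eq (gs : List (Int × Int × Int)) (ans p0 p1 p2 : Int) :
    (gs.foldl (fun (st : Int × Int × Int × Int) g =>
      if st.2.1 > 0 then
        (st.1 + (g.1 * 1 + g.2.1 * 1 + g.2.2 * 1), st.2.1 - 1, st.2.2.1, st.2.2.2)
      else if st.2.2.1 > 0 then
        (st.1 + (g.1 * 5 + g.2.1 * 1 + g.2.2 * 1), st.2.1, st.2.2.1 - 1, st.2.2.2)
      else
        (st.1 + (g.1 * 25 + g.2.1 * 5 + g.2.2 * 1), st.2.1, st.2.2.1, st.2.2.2 - 1))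
      (ans, p0, p1, p2)).1
    = ans + (gs.map (fun g => g.1)).sum + (gs.map (fun g => g.2.1)).sum
        + (gs.map (fun g => g.2.2)).sum
        + 4 * ((gs.drop (max p0 0).toNat).map (fun g => g.1)).sum
        + 20 * ((gs.drop ((max p0 0).toNat + (max p1 0).toNat)).map (fun g => g.1)).sum
        + 4 * ((gs.drop ((max p0 0).toNat + (max p1 0).toNat)).map (fun g => g.2.1)).sum := by
  induction gs generalizing ans p0 p1 p2 with
  | nil => simp
  | cons g gs ih =>
    simp only [List.foldl_cons, List.map_cons, List.sum_cons]
    by_cases h0 : p0 > 0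
    · have hm : (max p0 0).toNat = (max (p0 - 1) 0).toNat + 1 := by omega
      rw [if_pos h0]
      rw [ih (ans + (g.1 * 1 + g.2.1 * 1 + g.2.2 * 1)) (p0 - 1) p1 p2]
      rw [hm]
      simp only [List.drop_succ_cons, Nat.add_right_comm]
      ring
    · rw [if_neg h0]
      have hm : (max p0 0).toNat = 0 := by omega
      by_cases h1 : p1 > 0
      · have hm1 : (max p1 0).toNat = (max (p1 - 1) 0).toNat + 1 := by omega
        rw [if_pos h1]
        rw [ih (ans + (g.1 * 5 + g.2.1 * 1 + g.2.2 * 1)) p0 (p1 - 1) p2]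
        rw [hm, hm1]
        simp only [Nat.zero_add, List.drop_zero, List.drop_succ_cons, List.map_cons,
          List.sum_cons]
        ring
      · have hm1 : (max p1 0).toNat = 0 := by omega
        rw [if_neg h1]
        rw [ih (ans + (g.1 * 25 + g.2.1 * 5 + g.2.2 * 1)) p0 p1 (p2 - 1)]
        rw [hm, hm1]
        simp only [Nat.zero_add, List.drop_zero, List.map_cons, List.sum_cons]
        ring

-- ===== VERDICT (by name: the statement is the Claim_ definition above) =====
theorem solution_spec : Claim_equal_solution := by
  intro picks minerals _
  unfold Spec_solution solution solution_alt
  simp only [gt_iff_lt]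
  set trunc := if 5 * picks.sum < (minerals.length : Int)
    then PySem.List.slice minerals none (some (5 * picks.sum)) else minerals with htr
  have hgroups :
      (PySem.List.pyRange 0 (trunc.length : Int) 5).foldl (fun acc i =>
        let cnt := PySem.Dict.counter (PySem.List.slice trunc (some i) (some (i + 5)))
        acc ++ [(cnt.getD "diamond" 0, cnt.getD "iron" 0, cnt.getD "stone" 0)]) []
      = (PySem.List.pyRange 0 (trunc.length : Int) 5).map (fun i =>
        let chunk := PySem.List.slice trunc (some i) (some (i + 5))
        ((PySem.List.count chunk "diamond" : Int), (PySem.List.count chunk "iron" : Int),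
         (PySem.List.count chunk "stone" : Int))) := by
    rw [PySem.List.foldl_append_singleton_eq_map]
    simp [PySem.Dict.getD_counter, PySem.List.count]
  rw [hgroups]
  set groups := PySem.List.sorted
      ((PySem.List.pyRange 0 (trunc.length : Int) 5).map (fun i =>
        let chunk := PySem.List.slice trunc (some i) (some (i + 5))
        ((PySem.List.count chunk "diamond" : Int), (PySem.List.count chunk "iron" : Int),
         (PySem.List.count chunk "stone" : Int))))
      (fun g => g.1 * 36 + g.2.1 * 6 + g.2.2) true with hg
  by_cases hnil : groups = []
  · simp [hnil]
  · rw [if_neg hnil]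
    rw [pv_loop_eq]
    set p0 := PySem.List.pyGetD picks 0 0 with hp0
    set p1 := PySem.List.pyGetD picks 1 0 with hp1
    have ha : (0:Int) ≤ max p0 0 := le_max_right _ _
    by_cases hcase : max p0 0 < (groups.length : Int)
    · rw [if_pos hcase]
      have hb : (0:Int) ≤ max p1 0 := le_max_right _ _
      rw [PySem.List.slice_from _ ha, PySem.List.slice_from _ (by omega : (0:Int) ≤ _)]
      have hab : (max p0 0 + max p1 0).toNat = (max p0 0).toNat + (max p1 0).toNat := by omega
      rw [hab]
      ring
    · -- tier-0 picks cover every group: all suffixes past position a are empty on both sides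
      rw [if_neg hcase]
      have hlen : groups.length ≤ (max p0 0).toNat := by omega
      rw [PySem.List.slice_from _ ha, PySem.List.slice_from _ (by omega : (0:Int) ≤ max p0 0 + 0)]
      have h0 : (max p0 0 + 0).toNat = (max p0 0).toNat := by omega
      rw [h0]
      rw [List.drop_eq_nil_of_le hlen, List.drop_eq_nil_of_le (by omega : groups.length ≤ (max p0 0).toNat + (max p1 0).toNat)]
      simp
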